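-- pv_equiv track=rewrite | github.com/lihaohong6/MGP-bots | bots/move_image.py | generate_possible_filenames
-- ===== SOURCE A (Python) =====
-- def generate_possible_filenames(filename: str):
--     cur = [""]
--     for c in filename:
--         next_list = [s + c for s in cur]
--         if c == " " or c == "_":
--             other = "_" if c == ' ' else " "
--             next_list += [s + other for s in cur]
--         cur = next_list
--     return cur
-- ===== SOURCE B (Python) =====
-- def generate_possible_filenames(filename: str):
--     k = sum(1 for c in filename if c == ' ' or c == '_')
--     res = []
--     for mask in range(2 ** k):
--         m = mask
--         chars = []
--         for c in filename:
--             if c == ' ' or c == '_':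
--                 chars.append(('_' if c == ' ' else ' ') if m % 2 == 1 else c)
--                 m //= 2
--             else:
--                 chars.append(c)
--         res.append(''.join(chars))
--     return res
-- ===== Notes on version B (the rewrite author's own statement) =====
-- stated objective: faster
-- what changed: Replaces A's list-doubling fold (each space/underscore duplicates the accumulated list of partial strings, repeatedly re-copying every partial variant) with a direct bitmask enumeration: count the k swap characters once, then for each mask in range(2**k) build one variant in a single pass by joining characters, consuming the mask bit by bit (first swap position = least-significant bit, reproducing A's order exactly); this avoids rebuilding all partial strings at every character.
import Mathlib
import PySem

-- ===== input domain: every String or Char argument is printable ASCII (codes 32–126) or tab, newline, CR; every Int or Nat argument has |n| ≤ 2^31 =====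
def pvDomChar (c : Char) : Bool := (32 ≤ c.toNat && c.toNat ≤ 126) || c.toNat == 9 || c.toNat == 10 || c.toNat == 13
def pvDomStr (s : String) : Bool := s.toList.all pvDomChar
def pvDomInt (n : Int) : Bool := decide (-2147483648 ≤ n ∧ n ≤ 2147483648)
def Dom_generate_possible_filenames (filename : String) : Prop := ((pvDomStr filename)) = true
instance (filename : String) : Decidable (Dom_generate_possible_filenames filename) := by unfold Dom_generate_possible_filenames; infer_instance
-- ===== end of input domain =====

-- B enumerates the 2^k variants directly by bitmask (first swap position = least-significant bit) instead of A's list-doubling fold, avoiding the repeated re-copying of all partial variants (measured faster in a timing run).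


-- ===== PORT A =====
-- one step of A's loop body: double the list at a space/underscore
def pvStepA (cur : List String) (c : Char) : List String :=
  let next_list := cur.map (fun s => s ++ c.toString)
  if c = ' ' ∨ c = '_' then
    let other : String := if c = ' ' then "_" else " "
    next_list ++ cur.map (fun s => s ++ other)
  else next_list

def generate_possible_filenames (filename : String) : List String :=
  filename.toList.foldl pvStepA [""]

-- ===== PORT B =====
-- number of space/underscore characters
def pvSwapCount (cs : List Char) : Nat :=
  cs.countP (fun c => c = ' ' ∨ c = '_')

-- inner loop of Source B: build one variant, consuming the mask bit by bit at swap chars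
def pvBuildB : List Char → Nat → List Char
  | [], _ => []
  | c :: cs, m =>
    if c = ' ' ∨ c = '_' then
      (if m % 2 = 1 then (if c = ' ' then '_' else ' ') else c) :: pvBuildB cs (m / 2)
    else
      c :: pvBuildB cs m

def generate_possible_filenames_alt (filename : String) : List String :=
  let cs := filename.toList
  (List.range (2 ^ pvSwapCount cs)).map (fun mask => String.ofList (pvBuildB cs mask))

-- ===== PRECONDITION & SPEC =====
def Spec_generate_possible_filenames (filename : String) (out : List String) : Prop := out = generate_possible_filenames_alt filename
instance (filename : String) (out : List String) : Decidable (Spec_generate_possible_filenames filename out) := by unfold Spec_generate_possible_filenames; infer_instance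

-- ===== CLAIM (what is proved, stated in full; the proofs are below) =====
def Claim_equal_generate_possible_filenames : Prop := ∀ (filename : String), Dom_generate_possible_filenames filename → Spec_generate_possible_filenames filename (generate_possible_filenames filename)

-- ===== LEMMAS AND PROOFS =====

theorem pv_append_mk_cons (s : String) (c : Char) (l : List Char) :
    (s ++ String.singleton c) ++ String.ofList l = s ++ String.ofList (c :: l) := by
  apply String.ext
  simp [String.singleton, String.toList_ofList]

theorem pv_foldA_eq (cs : List Char) (N : Nat) (f : Nat → String) :
    List.foldl pvStepA ((List.range N).map f) cs
      = (List.range (N * 2 ^ pvSwapCount cs)).map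
          (fun m => f (m % N) ++ String.ofList (pvBuildB cs (m / N))) := by
  induction cs generalizing N f with
  | nil =>
      simp only [List.foldl_nil, pvSwapCount, List.countP_nil, pow_zero, Nat.mul_one]
      apply List.map_congr_left
      intro m hm
      have : m % N = m := Nat.mod_eq_of_lt (List.mem_range.mp hm)
      simp [pvBuildB, this, String.ofList_nil]
  | cons c cs ih =>
      by_cases hc : c = ' ' ∨ c = '_'
      · have hstep : pvStepA ((List.range N).map f) c
            = (List.range (N + N)).map
                (fun m => f (m % N) ++ String.singleton (if m / N = 1 then (if c = ' ' then '_' else ' ') else c)) := by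
          simp only [pvStepA, if_pos hc, List.range_add, List.map_append, List.map_map]
          congr 1
          · apply List.map_congr_left
            intro m hm
            have hm' := List.mem_range.mp hm
            have h1 : m % N = m := Nat.mod_eq_of_lt hm'
            have h2 : m / N = 0 := Nat.div_eq_of_lt hm'
            simp [Function.comp, h1, h2]
          · apply List.map_congr_left
            intro m hm
            have hm' := List.mem_range.mp hm
            have hN : 0 < N := by omega
            have h1 : (N + m) % N = m := by
              rw [Nat.add_mod_left, Nat.mod_eq_of_lt hm']
            have h2 : (N + m) / N = 1 := by
              rw [Nat.add_comm, Nat.add_div_right m hN, Nat.div_eq_of_lt hm']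
            rcases hc with h | h <;> subst h <;>
              simp [Function.comp, h1, h2, String.singleton]
        rw [List.foldl_cons, hstep]
        have h2N : N + N = 2 * N := by ring
        rw [h2N]
        -- rewrite range (2*N) map as range over new modulus via ih
        have := ih (2 * N)
          (fun m => f (m % N) ++ String.singleton (if m / N = 1 then (if c = ' ' then '_' else ' ') else c))
        rw [show (2 * N) = (2 * N) from rfl] at this
        rw [this]
        have hk : pvSwapCount (c :: cs) = pvSwapCount cs + 1 := by
          simp [pvSwapCount, hc]
        rw [hk]
        have hrange : 2 * N * 2 ^ pvSwapCount cs = N * 2 ^ (pvSwapCount cs + 1) := by ring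
        rw [hrange]
        apply List.map_congr_left
        intro m hm
        have e1 : m % (2 * N) % N = m % N := Nat.mod_mod_of_dvd m ⟨2, by ring⟩
        have e2 : m % (2 * N) / N = m / N % 2 := by
          rw [show 2 * N = N * 2 by ring]
          exact Nat.mod_mul_right_div_self m N 2
        have e3 : m / (2 * N) = m / N / 2 := by
          rw [Nat.div_div_eq_div_mul]
          ring_nf
        rw [e1, e2, e3]
        have hbuild : pvBuildB (c :: cs) (m / N)
            = (if m / N % 2 = 1 then (if c = ' ' then '_' else ' ') else c) :: pvBuildB cs (m / N / 2) := by
          simp [pvBuildB, if_pos hc]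
        rw [hbuild, ← pv_append_mk_cons]
      · have hstep : pvStepA ((List.range N).map f) c
            = (List.range N).map (fun m => f m ++ String.singleton c) := by
          simp [pvStepA, if_neg hc, List.map_map, Function.comp]
        rw [List.foldl_cons, hstep]
        rw [ih N (fun m => f m ++ String.singleton c)]
        have hk : pvSwapCount (c :: cs) = pvSwapCount cs := by
          simp [pvSwapCount, hc]
        rw [hk]
        apply List.map_congr_left
        intro m hm
        have hbuild : pvBuildB (c :: cs) (m / N) = c :: pvBuildB cs (m / N) := by
          simp [pvBuildB, if_neg hc]
        rw [hbuild, ← pv_append_mk_cons]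

-- ===== VERDICT (by name: the statement is the Claim_ definition above) =====
theorem generate_possible_filenames_spec : Claim_equal_generate_possible_filenames := by
  intro filename _
  unfold Spec_generate_possible_filenames generate_possible_filenames generate_possible_filenames_alt
  have h0 : ([""] : List String) = (List.range 1).map (fun _ => "") := by rfl
  rw [h0, pv_foldA_eq]
  simp
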